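-- pv_equiv track=rewrite | github.com/lhuasheng/localCMS | cli/core/obsidian_vault.py | _strip_indented_code_blocks
-- ===== SOURCE A (Python) =====
-- def _strip_indented_code_blocks(content: str) -> str:
--     stripped_lines: list[str] = []
--     in_code_block = False
--
--     for line in content.splitlines():
--         is_indented = line.startswith("    ") or line.startswith("\t")
--
--         if in_code_block:
--             if is_indented or not line.strip():
--                 stripped_lines.append("")
--                 continue
--             in_code_block = False
--
--         if is_indented and (not stripped_lines or not stripped_lines[-1].strip()):
--             in_code_block = True
--             stripped_lines.append("")
--             continue
--
--         stripped_lines.append(line)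
--
--     return "\n".join(stripped_lines)
-- ===== SOURCE B (Python) =====
-- def _strip_indented_code_blocks(content: str) -> str:
--     lines = content.splitlines()
--     out: list[str] = []
--     i = 0
--     while i < len(lines):
--         line = lines[i]
--         indented = line.startswith("    ") or line.startswith("\t")
--         if indented and (not out or not out[-1].strip()):
--             # a code block starts here: blank it and consume every following
--             # indented-or-blank line as part of the block
--             out.append("")
--             i += 1
--             while i < len(lines):
--                 nxt = lines[i]
--                 if nxt.startswith("    ") or nxt.startswith("\t") or not nxt.strip():
--                     out.append("")
--                     i += 1
--                 else:
--                     break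
--         else:
--             out.append(line)
--             i += 1
--     return "\n".join(out)
-- ===== Notes on version B (the rewrite author's own statement) =====
-- stated objective: alternative
-- what changed: Replaces A's single-pass flag state machine (in_code_block carried across iterations, re-checked at each line) with an index-driven outer scan that, on detecting a block start, runs an inner loop consuming the whole run of indented-or-blank lines at once.
import Mathlib
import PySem

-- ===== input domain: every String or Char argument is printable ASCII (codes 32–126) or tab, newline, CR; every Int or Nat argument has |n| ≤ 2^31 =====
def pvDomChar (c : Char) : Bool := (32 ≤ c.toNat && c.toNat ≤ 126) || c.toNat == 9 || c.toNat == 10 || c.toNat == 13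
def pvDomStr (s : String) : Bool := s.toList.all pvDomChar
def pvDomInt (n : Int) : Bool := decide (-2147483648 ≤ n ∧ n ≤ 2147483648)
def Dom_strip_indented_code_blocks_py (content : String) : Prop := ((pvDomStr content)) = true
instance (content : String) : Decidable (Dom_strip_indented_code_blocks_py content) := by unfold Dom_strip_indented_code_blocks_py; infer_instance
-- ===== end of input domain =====

-- B restructures A's flag state machine into an outer scan with an inner loop that
-- consumes a whole indented block at once (objective: alternative decomposition; same cost).
-- ===== PORT A =====
-- accumulator kept reversed (head = last appended line); the two in_code_block
-- states of the loop body are the two match arms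
def stripA_step : List String × Bool → String → List String × Bool
  | (acc, true), line =>
    if PySem.Str.startswith line "    " || PySem.Str.startswith line "\t"
        || PySem.Str.strip line == "" then ("" :: acc, true)
    else
      -- in_code_block := False, fall through to the block-start check
      if (PySem.Str.startswith line "    " || PySem.Str.startswith line "\t")
          && (acc.isEmpty || PySem.Str.strip (acc.headD "") == "") then ("" :: acc, true)
      else (line :: acc, false)
  | (acc, false), line =>
    if (PySem.Str.startswith line "    " || PySem.Str.startswith line "\t")
        && (acc.isEmpty || PySem.Str.strip (acc.headD "") == "") then ("" :: acc, true)
    else (line :: acc, false)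

def strip_indented_code_blocks_py (content : String) : String :=
  PySem.Str.join "\n"
    ((PySem.Str.splitlines content).foldl stripA_step ([], false)).1.reverse

-- ===== PORT B =====
def stripB_indented (l : String) : Bool :=
  PySem.Str.startswith l "    " || PySem.Str.startswith l "\t"

-- inner while loop: consume indented-or-blank lines, appending "" for each;
-- returns (accumulator, remaining lines)
def stripB_inner : List String → List String → List String × List String
  | [], acc => (acc, [])
  | l :: ls, acc =>
    if stripB_indented l || PySem.Str.strip l == "" then stripB_inner ls ("" :: acc)
    else (acc, l :: ls)

theorem stripB_inner_len (ls acc : List String) :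
    (stripB_inner ls acc).2.length ≤ ls.length := by
  induction ls generalizing acc with
  | nil => simp [stripB_inner]
  | cons l ls ih =>
    simp only [stripB_inner]
    split
    · exact le_trans (ih _) (Nat.le_succ _)
    · simp

-- outer while loop (accumulator reversed, head = last emitted line)
def stripB_outer : List String → List String → List String
  | [], acc => acc
  | l :: ls, acc =>
    if stripB_indented l && (acc.isEmpty || PySem.Str.strip (acc.headD "") == "") then
      let p := stripB_inner ls ("" :: acc)
      stripB_outer p.2 p.1
    else stripB_outer ls (l :: acc)
  termination_by ls _ => ls.length
  decreasing_by
    · exact Nat.lt_succ_of_le (stripB_inner_len ls ("" :: acc))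
    · simp

def strip_indented_code_blocks_py_alt (content : String) : String :=
  PySem.Str.join "\n" (stripB_outer (PySem.Str.splitlines content) []).reverse

-- ===== PRECONDITION & SPEC =====
def Spec_strip_indented_code_blocks_py (content : String) (out : String) : Prop := out = strip_indented_code_blocks_py_alt content
instance (content : String) (out : String) : Decidable (Spec_strip_indented_code_blocks_py content out) := by unfold Spec_strip_indented_code_blocks_py; infer_instance

-- ===== CLAIM (what is proved, stated in full; the proofs are below) =====
def Claim_equal_strip_indented_code_blocks_py : Prop := ∀ (content : String), Dom_strip_indented_code_blocks_py content → Spec_strip_indented_code_blocks_py content (strip_indented_code_blocks_py content)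

-- ===== LEMMAS AND PROOFS =====
theorem stripB_outer_cons (l : String) (ls acc : List String) :
    stripB_outer (l :: ls) acc =
      if stripB_indented l && (acc.isEmpty || PySem.Str.strip (acc.headD "") == "") then
        stripB_outer (stripB_inner ls ("" :: acc)).2 (stripB_inner ls ("" :: acc)).1
      else stripB_outer ls (l :: acc) := by
  rw [stripB_outer]

theorem stripAB_core (ls : List String) : ∀ acc : List String,
    (ls.foldl stripA_step (acc, false)).1 = stripB_outer ls acc ∧
    (ls.foldl stripA_step (acc, true)).1 =
      stripB_outer (stripB_inner ls acc).2 (stripB_inner ls acc).1 := by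
  induction ls with
  | nil => intro acc; simp [stripB_outer, stripB_inner]
  | cons l ls ih =>
    intro acc
    constructor
    · rw [List.foldl_cons, stripB_outer_cons]
      by_cases hc : ((PySem.Str.startswith l "    " || PySem.Str.startswith l "\t")
          && (acc.isEmpty || PySem.Str.strip (acc.headD "") == "")) = true
      · rw [if_pos (by simpa [stripB_indented] using hc)]
        simp only [stripA_step, if_pos hc]
        exact (ih ("" :: acc)).2
      · rw [if_neg (by simpa [stripB_indented] using hc)]
        simp only [stripA_step, if_neg hc]
        exact (ih (l :: acc)).1
    · simp only [List.foldl_cons, stripA_step, stripB_inner, stripB_indented]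
      by_cases hb : (PySem.Str.startswith l "    " || PySem.Str.startswith l "\t"
          || PySem.Str.strip l == "") = true
      · rw [if_pos hb, if_pos hb]
        exact (ih ("" :: acc)).2
      · rw [if_neg hb, if_neg hb]
        have hind : PySem.Chars.startswith l.toList [' ', ' ', ' ', ' '] = false ∧
            PySem.Chars.startswith l.toList ['\t'] = false := by
          simp only [Bool.or_eq_true, not_or] at hb
          constructor <;> simp_all
        rw [if_neg (by simp [hind.1, hind.2]), stripB_outer_cons,
          if_neg (by simp [stripB_indented, hind.1, hind.2])]
        exact (ih (l :: acc)).1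

theorem stripAB_eq (content : String) :
    strip_indented_code_blocks_py content = strip_indented_code_blocks_py_alt content := by
  unfold strip_indented_code_blocks_py strip_indented_code_blocks_py_alt
  rw [(stripAB_core (PySem.Str.splitlines content) []).1]

-- ===== VERDICT (by name: the statement is the Claim_ definition above) =====
theorem strip_indented_code_blocks_py_spec : Claim_equal_strip_indented_code_blocks_py := by
  intro content _
  exact stripAB_eq content
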